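-- pv_equiv track=rewrite | github.com/Mihretthe/Competitive-Programming | leet-code-solutions/largest-3-same-digit-number-in-string.py | largestGoodInteger
-- ===== SOURCE A (Python) =====
-- def largestGoodInteger(num: str) -> str:
--     m = ""
--     l = 0
--     r = 3
--     n = len(num)
--
--     while r <= n:
--         if len(set(num[l:r])) == 1:
--             if m and int(m) < int(num[l:r]):
--                 m = num[l:r]
--             elif m == "":
--                 m = num[l:r]
--
--         l += 1
--         r += 1
--     return m
-- ===== SOURCE B (Python) =====
-- def largestGoodInteger(num: str) -> str:
--     for d in "9876543210":
--         if d * 3 in num: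
--             return d * 3
--     return ""
-- ===== Notes on version B (the rewrite author's own statement) =====
-- stated objective: idiomatic
-- what changed: Replaces the sliding-window scan with set-uniformity tests and int-value max tracking by a descending enumeration of the ten identical-digit candidate triples with a substring-membership test, returning the first hit; Pre_ excludes strings containing a run of three identical non-digit characters, where A returns a non-digit string or raises ValueError from int().
-- outside the precondition, e.g. on largestGoodInteger('+++'): A returns '+++', B returns ''; on largestGoodInteger('999aaa'): A raises ValueError, B returns '999'
import Mathlib
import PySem

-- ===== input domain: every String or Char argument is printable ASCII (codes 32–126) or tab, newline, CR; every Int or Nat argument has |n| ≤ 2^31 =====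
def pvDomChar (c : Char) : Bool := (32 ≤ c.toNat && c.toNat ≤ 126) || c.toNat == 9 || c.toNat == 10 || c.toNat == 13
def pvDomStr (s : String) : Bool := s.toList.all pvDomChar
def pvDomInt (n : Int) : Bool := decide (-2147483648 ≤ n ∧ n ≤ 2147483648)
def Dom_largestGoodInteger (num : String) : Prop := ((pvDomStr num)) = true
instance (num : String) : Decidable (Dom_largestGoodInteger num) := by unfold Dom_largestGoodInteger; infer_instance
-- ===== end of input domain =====

-- B replaces A's sliding-window scan (set-uniformity test + int-value max tracking) by trying the ten
-- identical-digit candidate triples in descending digit order with a substring-membership test (idiomatic, not faster).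

-- ===== PORT A =====
-- the body of A's while loop, step for step (int(m) < int(num[l:r]) via ofStr?; the catch-all
-- match arm is Python's ValueError, unreachable under Pre_)
def pvAStep (m : String) (w : List Char) : String :=
  if PySem.Set.len (PySem.Set.ofList w) = 1 then
    if m ≠ "" then
      match PySem.Int.ofStr? m, PySem.Int.ofStr? (String.ofList w) with
      | some a, some b => if a < b then String.ofList w else m
      | _, _ => m
    else String.ofList w
  else m

def pvAGo (cs : List Char) (n l r : Nat) (m : String) : String :=
  if _h : r ≤ n then
    pvAGo cs n (l + 1) (r + 1) (pvAStep m (PySem.List.slice cs (some (l : Int)) (some (r : Int))))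
  else m
termination_by n + 1 - r

def largestGoodInteger (num : String) : String :=
  pvAGo num.toList num.toList.length 0 3 ""

-- ===== PORT B =====
def pvBGo (num : String) (ds : List Char) : String :=
  match ds with
  | [] => ""
  | d :: rest =>
    if PySem.Str.isIn (String.ofList [d, d, d]) num then String.ofList [d, d, d] else pvBGo num rest

def largestGoodInteger_alt (num : String) : String :=
  pvBGo num "9876543210".toList

-- ===== PRECONDITION & SPEC =====
-- Pre_ excludes strings containing a run of three identical non-digit characters: there A either
-- raises ValueError (int() applied to a non-digit triple) or returns a non-digit string, an
-- artefact outside the problem's digit-string domain.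
def pvNoBadRun : List Char → Bool
  | a :: b :: c :: t => (!(a == b && b == c) || a.isDigit) && pvNoBadRun (b :: c :: t)
  | _ => true

def Pre_largestGoodInteger (num : String) : Prop := pvNoBadRun num.toList = true
instance (num : String) : Decidable (Pre_largestGoodInteger num) := by
  unfold Pre_largestGoodInteger; infer_instance

def pvWitness_largestGoodInteger : String := "a2777x999"

def Spec_largestGoodInteger (num : String) (out : String) : Prop := out = largestGoodInteger_alt num
instance (num : String) (out : String) : Decidable (Spec_largestGoodInteger num out) := by unfold Spec_largestGoodInteger; infer_instance

-- ===== CLAIM (what is proved, stated in full; the proofs are below) =====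
def Claim_equal_largestGoodInteger : Prop := ∀ (num : String), Dom_largestGoodInteger num → Pre_largestGoodInteger num → Spec_largestGoodInteger num (largestGoodInteger num)

-- ===== LEMMAS AND PROOFS =====

-- max uniform-triple character of a list (none if no three consecutive equal characters)
def pvUb : List Char → Option Char
  | a :: b :: c :: t =>
    let r := pvUb (b :: c :: t)
    if a = b ∧ b = c then
      match r with
      | none => some a
      | some x => some (max a x)
    else r
  | _ => none

def pvDigits : List Char := ['0','1','2','3','4','5','6','7','8','9']

theorem pvDigit_mem {c : Char} (h : c.isDigit) : c ∈ pvDigits := by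
  simp [Char.isDigit, UInt32.le_iff_toNat_le] at h
  obtain ⟨h1, h2⟩ := h
  have key : ∀ d : Char, c.toNat = d.toNat → c = d := by
    intro d hd
    exact Char.ext (UInt32.toNat_inj.mp hd)
  have hh : c.toNat = 48 ∨ c.toNat = 49 ∨ c.toNat = 50 ∨ c.toNat = 51 ∨
      c.toNat = 52 ∨ c.toNat = 53 ∨ c.toNat = 54 ∨ c.toNat = 55 ∨
      c.toNat = 56 ∨ c.toNat = 57 := by omega
  rcases hh with h|h|h|h|h|h|h|h|h|h <;>
    [ exact (key '0' h) ▸ (by decide);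
      exact (key '1' h) ▸ (by decide);
      exact (key '2' h) ▸ (by decide);
      exact (key '3' h) ▸ (by decide);
      exact (key '4' h) ▸ (by decide);
      exact (key '5' h) ▸ (by decide);
      exact (key '6' h) ▸ (by decide);
      exact (key '7' h) ▸ (by decide);
      exact (key '8' h) ▸ (by decide);
      exact (key '9' h) ▸ (by decide)]

theorem pvOfTrip {c : Char} (h : c ∈ pvDigits) :
    PySem.Int.ofStr? (String.ofList [c, c, c]) = some (111 * ((c.toNat : Int) - 48)) := by
  fin_cases h <;> decide

theorem pvSetLen1 (x y z : Char) :
    (PySem.Set.len (PySem.Set.ofList [x, y, z]) = 1) ↔ (x = y ∧ y = z) := by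
  by_cases hxy : x = y <;> by_cases hyz : y = z <;> by_cases hxz : x = z <;>
    simp_all [PySem.Set.ofList, PySem.Set.add, PySem.Set.contains, PySem.Set.len, List.foldl,
      eq_comm, Ne.symm]

theorem pvTripInfix (c a b d : Char) (r : List Char) :
    [c,c,c] <:+: a :: b :: d :: r ↔ (c = a ∧ c = b ∧ c = d) ∨ [c,c,c] <:+: b :: d :: r := by
  rw [List.infix_cons_iff]
  simp [List.cons_prefix_cons]

theorem pvTripShort (c : Char) (t : List Char) (h : t.length < 3) : ¬ [c,c,c] <:+: t := by
  intro hc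
  have := hc.length_le
  simp at this; omega

theorem pvUb_spec (t : List Char) :
    (∀ c, pvUb t = some c → ([c,c,c] <:+: t ∧ ∀ e, [e,e,e] <:+: t → e ≤ c)) ∧
    (pvUb t = none → ∀ e, ¬[e,e,e] <:+: t) := by
  induction hn : t.length using Nat.strong_induction_on generalizing t with
  | _ n ihn =>
  rcases t with _ | ⟨a, _ | ⟨b, _ | ⟨d, r⟩⟩⟩
  · exact ⟨by intro c hc; simp [pvUb] at hc, fun _ e => pvTripShort e _ (by simp)⟩
  · exact ⟨by intro c hc; simp [pvUb] at hc, fun _ e => pvTripShort e _ (by simp)⟩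
  · exact ⟨by intro c hc; simp [pvUb] at hc, fun _ e => pvTripShort e _ (by simp)⟩
  · have ih := ihn (b :: d :: r).length (by subst hn; simp) (b :: d :: r) rfl
    by_cases hu : a = b ∧ b = d
    · obtain ⟨hab, hbd⟩ := hu
      cases hx : pvUb (b :: d :: r) with
      | none =>
        have hub : pvUb (a :: b :: d :: r) = some a := by
          simp only [pvUb]
          rw [if_pos ⟨hab, hbd⟩, hx]
        refine ⟨?_, by simp [hub]⟩
        intro c hc
        rw [hub] at hc
        injection hc with hc; subst hc
        refine ⟨(pvTripInfix _ a b d r).mpr (Or.inl ⟨rfl, hab, hab.trans hbd⟩), ?_⟩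
        intro e he
        rcases (pvTripInfix e a b d r).mp he with ⟨h1, _, _⟩ | h2
        · exact le_of_eq h1
        · exact absurd h2 (ih.2 hx e)
      | some x =>
        have hub : pvUb (a :: b :: d :: r) = some (max a x) := by
          simp only [pvUb]
          rw [if_pos ⟨hab, hbd⟩, hx]
        refine ⟨?_, by simp [hub]⟩
        intro c hc
        rw [hub] at hc
        injection hc with hc; subst hc
        obtain ⟨hx1, hx2⟩ := ih.1 x hx
        constructor
        · rcases max_choice a x with hm | hm <;> rw [hm]
          · exact (pvTripInfix a a b d r).mpr (Or.inl ⟨rfl, hab, hab.trans hbd⟩)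
          · exact (pvTripInfix x a b d r).mpr (Or.inr hx1)
        · intro e he
          rcases (pvTripInfix e a b d r).mp he with ⟨h1, _, _⟩ | h2
          · exact h1 ▸ le_max_left a x
          · exact le_trans (hx2 e h2) (le_max_right a x)
    · have hub : pvUb (a :: b :: d :: r) = pvUb (b :: d :: r) := by
        simp [pvUb, hu]
      rw [hub]
      constructor
      · intro c hc
        obtain ⟨h1, h2⟩ := ih.1 c hc
        refine ⟨(pvTripInfix c a b d r).mpr (Or.inr h1), ?_⟩
        intro e he
        rcases (pvTripInfix e a b d r).mp he with ⟨h1', h2', h3'⟩ | hh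
        · exact absurd ⟨h1' ▸ h2' ▸ rfl, h2' ▸ h3' ▸ rfl⟩ hu
        · exact h2 e hh
      · intro hn' e he
        rcases (pvTripInfix e a b d r).mp he with ⟨h1', h2', h3'⟩ | hh
        · exact hu ⟨h1' ▸ h2' ▸ rfl, h2' ▸ h3' ▸ rfl⟩
        · exact ih.2 hn' e hh

theorem pvNoBadRun_spec (t : List Char) (h : pvNoBadRun t = true) :
    ∀ c, [c, c, c] <:+: t → c.isDigit := by
  induction hn : t.length using Nat.strong_induction_on generalizing t with
  | _ n ihn =>
  rcases t with _ | ⟨a, _ | ⟨b, _ | ⟨d, r⟩⟩⟩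
  · exact fun c hc => absurd hc (pvTripShort c _ (by simp))
  · exact fun c hc => absurd hc (pvTripShort c _ (by simp))
  · exact fun c hc => absurd hc (pvTripShort c _ (by simp))
  · simp only [pvNoBadRun, Bool.and_eq_true, Bool.or_eq_true, Bool.not_eq_eq_eq_not,
      Bool.not_true, Bool.and_eq_false_imp, beq_iff_eq] at h
    intro c hc
    rcases (pvTripInfix c a b d r).mp hc with ⟨h1, h2, h3⟩ | hh
    · rcases h.1 with hna | hdig
      · have hab : a = b := h1.symm.trans h2
        have hbd : b = d := h2.symm.trans h3
        exact absurd (beq_iff_eq.mpr hbd) (by simp [hna hab])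
      · exact h1 ▸ hdig
    · exact ihn (b :: d :: r).length (by subst hn; simp) _ h.2 rfl c hh

theorem pvUb_short {t : List Char} (h : t.length < 3) : pvUb t = none := by
  rcases t with _ | ⟨a, _ | ⟨b, _ | ⟨d, r⟩⟩⟩
  · rfl
  · rfl
  · rfl
  · exfalso; simp at h; omega

theorem pvTrip_ne_empty (c : Char) : String.ofList [c, c, c] ≠ "" := by
  intro h
  have := congrArg String.toList h
  simp at this

theorem pvCharLt (a b : Char) :
    (111 * ((a.toNat : Int) - 48) < 111 * ((b.toNat : Int) - 48)) ↔ a < b := by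
  rw [Char.lt_def, UInt32.lt_iff_toNat_lt]
  constructor
  · intro h
    show a.toNat < b.toNat
    omega
  · intro h
    have h' : a.toNat < b.toNat := h
    omega

theorem pvStepEmpty (c : Char) : pvAStep "" [c, c, c] = String.ofList [c, c, c] := by
  unfold pvAStep
  rw [if_pos ((pvSetLen1 c c c).mpr ⟨rfl, rfl⟩)]
  simp

theorem pvStepTrip {d c : Char} (hd : d ∈ pvDigits) (hc : c ∈ pvDigits) :
    pvAStep (String.ofList [d, d, d]) [c, c, c] =
      String.ofList [max d c, max d c, max d c] := by
  unfold pvAStep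
  rw [if_pos ((pvSetLen1 c c c).mpr ⟨rfl, rfl⟩), if_pos (by simp [pvTrip_ne_empty d]),
    pvOfTrip hd, pvOfTrip hc]
  dsimp only
  by_cases h : d < c
  · rw [if_pos ((pvCharLt d c).mpr h), max_eq_right (le_of_lt h)]
  · rw [if_neg (fun hlt => h ((pvCharLt d c).mp hlt)), max_eq_left (not_lt.mp h)]

theorem pvStepStep {a x : Char} {m : String} (ha : a ∈ pvDigits) (hx : x ∈ pvDigits)
    (hm : m = "" ∨ ∃ d ∈ pvDigits, m = String.ofList [d, d, d]) :
    pvAStep (pvAStep m [a, a, a]) [x, x, x] = pvAStep m [max a x, max a x, max a x] := by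
  have hmax : max a x ∈ pvDigits := by rcases max_choice a x with h | h <;> rw [h] <;> assumption
  rcases hm with rfl | ⟨d, hd, rfl⟩
  · rw [pvStepEmpty, pvStepTrip ha hx, pvStepEmpty]
  · have hmda : max d a ∈ pvDigits := by
      rcases max_choice d a with hh | hh <;> rw [hh] <;> assumption
    rw [pvStepTrip hd ha, pvStepTrip hmda hx, pvStepTrip hd hmax, max_assoc]

theorem pvLoopA (cs : List Char) (l : Nat) (m : String)
    (hpre : ∀ c, [c, c, c] <:+: cs → c ∈ pvDigits)
    (hm : m = "" ∨ ∃ d ∈ pvDigits, m = String.ofList [d, d, d]) :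
    pvAGo cs cs.length l (l + 3) m =
      match pvUb (cs.drop l) with
      | none => m
      | some c => pvAStep m [c, c, c] := by
  induction hk : cs.length - l using Nat.strong_induction_on generalizing l m with
  | _ k ihk =>
  by_cases h : l + 3 ≤ cs.length
  · -- the loop runs: the window is the first three of cs.drop l
    have hlen : (cs.drop l).length = cs.length - l := by simp
    rcases ht : cs.drop l with _ | ⟨a, _ | ⟨b, _ | ⟨d, t'⟩⟩⟩ <;>
      rw [ht] at hlen <;> try (exfalso; simp at hlen; omega)
    have hw : PySem.List.slice cs (some (l : Int)) (some ((l + 3 : Nat) : Int)) = [a, b, d] := by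
      rw [PySem.List.slice_natCast, ht]
      simp
    have hdrop : cs.drop (l + 1) = b :: d :: t' := by
      have h1 := congrArg (List.drop 1) ht
      simpa [List.drop_drop, Nat.add_comm] using h1
    have hinf_cs : ∀ e, [e, e, e] <:+: a :: b :: d :: t' → [e, e, e] <:+: cs := by
      intro e he
      exact he.trans (ht ▸ (cs.drop_suffix l).isInfix)
    have hih := ihk (cs.length - (l + 1)) (by omega) (l + 1)
    rw [pvAGo, dif_pos h, hw]
    by_cases hu : a = b ∧ b = d
    · obtain ⟨hab, hbd⟩ := hu
      have hwu : [a, b, d] = [a, a, a] := by rw [hab, hbd]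
      have ha : a ∈ pvDigits := by
        apply hpre
        apply hinf_cs
        exact (pvTripInfix a a b d t').mpr (Or.inl ⟨rfl, hab, hab.trans hbd⟩)
      have hm' : pvAStep m [a, a, a] = "" ∨
          ∃ e ∈ pvDigits, pvAStep m [a, a, a] = String.ofList [e, e, e] := by
        rcases hm with rfl | ⟨d0, hd0, rfl⟩
        · exact Or.inr ⟨a, ha, pvStepEmpty a⟩
        · exact Or.inr ⟨max d0 a, by rcases max_choice d0 a with hh | hh <;> rw [hh] <;>
            assumption, pvStepTrip hd0 ha⟩
      have hrec := hih (pvAStep m [a, a, a]) hm' rfl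
      rw [show l + 3 + 1 = (l + 1) + 3 from rfl, hwu, hrec, hdrop]
      have hub : pvUb (a :: b :: d :: t') =
          match pvUb (b :: d :: t') with
          | none => some a
          | some x => some (max a x) := by
        simp only [pvUb]
        rw [if_pos ⟨hab, hbd⟩]
      rw [hub]
      cases hx : pvUb (b :: d :: t') with
      | none => rfl
      | some x =>
        dsimp only
        have hxd : x ∈ pvDigits := by
          apply hpre
          apply hinf_cs
          exact (pvTripInfix x a b d t').mpr
            (Or.inr ((pvUb_spec (b :: d :: t')).1 x hx).1)
        exact (pvStepStep ha hxd hm).symm ▸ pvStepStep ha hxd hm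
    · -- window not uniform: the step is the identity and pvUb skips the head
      have hstep : pvAStep m [a, b, d] = m := by
        unfold pvAStep
        rw [if_neg (fun hl => hu ((pvSetLen1 a b d).mp hl))]
      have hub : pvUb (a :: b :: d :: t') = pvUb (b :: d :: t') := by
        simp [pvUb, hu]
      have hrec := hih m hm rfl
      rw [hstep, hub, show l + 3 + 1 = (l + 1) + 3 from rfl, hrec, hdrop]
  · rw [pvAGo, dif_neg h, pvUb_short (by simp; omega)]

theorem pvLoopB (num : String) (ds : List Char) (c : Char)
    (hdesc : ds.Pairwise (· > ·))
    (hc : c ∈ ds)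
    (hin : [c, c, c] <:+: num.toList)
    (hmax : ∀ e, [e, e, e] <:+: num.toList → e ≤ c) :
    pvBGo num ds = String.ofList [c, c, c] := by
  induction ds with
  | nil => simp at hc
  | cons e rest ih =>
    rw [pvBGo]
    by_cases hhit : PySem.Str.isIn (String.ofList [e, e, e]) num = true
    · rw [if_pos hhit]
      have hinf : [e, e, e] <:+: num.toList := by
        have := (PySem.Str.isIn_iff_infix _ _).mp hhit
        simpa using this
      have hec : e ≤ c := hmax e hinf
      rcases List.mem_cons.mp hc with rfl | hcr
      · rfl
      · exact absurd hec (not_le.mpr ((List.pairwise_cons.mp hdesc).1 c hcr))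
    · rw [if_neg hhit]
      rcases List.mem_cons.mp hc with rfl | hcr
      · exfalso
        apply hhit
        rw [PySem.Str.isIn_iff_infix]
        simpa using hin
      · exact ih (List.pairwise_cons.mp hdesc).2 hcr

theorem pvLoopB_none (num : String) (ds : List Char)
    (h : ∀ e, ¬ [e, e, e] <:+: num.toList) :
    pvBGo num ds = "" := by
  induction ds with
  | nil => rfl
  | cons e rest ih =>
    rw [pvBGo, if_neg, ih]
    intro hhit
    exact h e (by simpa using (PySem.Str.isIn_iff_infix _ _).mp hhit)

-- ===== VERDICT (by name: the statement is the Claim_ definition above) =====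
theorem largestGoodInteger_spec : Claim_equal_largestGoodInteger := by
  intro num _hdom hpre
  unfold Spec_largestGoodInteger largestGoodInteger largestGoodInteger_alt
  have hpre' : ∀ c, [c, c, c] <:+: num.toList → c ∈ pvDigits := by
    intro c hc
    exact pvDigit_mem (pvNoBadRun_spec num.toList hpre c hc)
  have hA := pvLoopA num.toList 0 "" hpre' (Or.inl rfl)
  simp only [List.drop_zero, Nat.zero_add] at hA
  rw [hA]
  cases hub : pvUb num.toList with
  | none =>
    rw [pvLoopB_none num _ ((pvUb_spec num.toList).2 hub)]
  | some c =>
    obtain ⟨hin, hmax⟩ := (pvUb_spec num.toList).1 c hub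
    dsimp only
    rw [pvStepEmpty, pvLoopB num _ c (by decide) ?_ hin hmax]
    have hcd : c ∈ pvDigits := hpre' c hin
    fin_cases hcd <;> decide
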